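-- pv_equiv track=rewrite | github.com/CompNet/novelties-bookshare | novelties_bookshare/utils.py | strksplit
-- ===== SOURCE A (Python) =====
-- def strksplit(string: str, k: int, _i: int = 1) -> list[list[str]]:
--     """Enumerate all possible ways of splitting a string into k
--     substrings using backtracking.  Do not count empty strings as a
--     valid substring.
--
--     >>> strksplit("abc", 2)
--     [['a', 'bc'], ['ab', 'c']]
--
--     :param string: the string to split
--     :param k: the number of substring to generate
--     :param _i: private parameter, indicating the current split
--         decision index
--     :return: a list of all possible splits of STRNIG of size K
--     """
--     assert k >= 1
--     splits = []
--
--     if k == 1: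
--         return [[string]]
--
--     if _i >= len(string):
--         return []
--
--     # 1. we choose to split here
--     for split in strksplit(string[_i:], k - 1, 1):
--         splits.append([string[:_i]] + split)
--
--     # 2. we do not split here
--     splits += strksplit(string, k, _i + 1)
--
--     return splits
-- ===== SOURCE B (Python) =====
-- def strksplit(string: str, k: int, _i: int = 1) -> list[list[str]]:
--     """Enumerate all splits of STRING into K nonempty substrings.
--
--     Instead of split-here/advance backtracking on a private index, loop
--     directly over the end index i of the first piece (from _i upward)
--     and recurse only on the shrinking suffix.
--     """
--     assert k >= 1
--     if k == 1:
--         return [[string]]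
--     return [[string[:i]] + rest
--             for i in range(_i, len(string))
--             for rest in strksplit(string[i:], k - 1, 1)]
-- ===== Notes on version B (the rewrite author's own statement) =====
-- stated objective: simpler
-- what changed: Replaces A's binary split-here/advance-_i backtracking recursion (which recurses on the same string with an incremented index) by a single direct loop over the end index of the first piece, recursing only on shrinking suffixes with k-1; same output order.
import Mathlib
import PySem

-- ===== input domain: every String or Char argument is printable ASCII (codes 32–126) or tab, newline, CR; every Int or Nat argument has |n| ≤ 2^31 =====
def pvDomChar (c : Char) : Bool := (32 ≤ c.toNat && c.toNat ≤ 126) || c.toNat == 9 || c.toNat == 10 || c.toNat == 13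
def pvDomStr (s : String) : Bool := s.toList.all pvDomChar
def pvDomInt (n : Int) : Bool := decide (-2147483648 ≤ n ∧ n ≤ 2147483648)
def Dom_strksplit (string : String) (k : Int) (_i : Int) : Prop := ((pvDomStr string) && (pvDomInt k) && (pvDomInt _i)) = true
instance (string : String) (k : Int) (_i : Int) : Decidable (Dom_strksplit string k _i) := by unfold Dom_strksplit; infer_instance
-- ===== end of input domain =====

-- B replaces A's split-here/advance-_i backtracking recursion by a direct loop over the end index of the first piece, recursing only on shrinking suffixes (objective: simpler; same output, same order).


-- ===== PORT A =====
def strksplit (string : String) (k : Int) (_i : Int) : List (List String) :=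
  if k < 1 then []  -- Python: assert k >= 1 raises here; excluded by Pre_strksplit
  else if k = 1 then [[string]]
  else if PySem.Str.len string ≤ _i then []
  else
    -- 1. split here; 2. do not split here
    ((strksplit (PySem.Str.slice string (some _i) none) (k - 1) 1).foldl
        (fun acc split => acc ++ [PySem.Str.slice string none (some _i) :: split]) [])
      ++ strksplit string k (_i + 1)
termination_by (k.toNat, (PySem.Str.len string - _i).toNat)
decreasing_by
  · exact Prod.Lex.left _ _ (by omega)
  · exact Prod.Lex.right _ (by omega)


-- ===== PORT B =====
def strksplit_alt (string : String) (k : Int) (_i : Int) : List (List String) :=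
  if k < 1 then []  -- Python: assert k >= 1 raises here; excluded by Pre_strksplit
  else if k = 1 then [[string]]
  else (PySem.List.pyRange _i (PySem.Str.len string) 1).flatMap (fun i =>
    (strksplit_alt (PySem.Str.slice string (some i) none) (k - 1) 1).map
      (fun rest => PySem.Str.slice string none (some i) :: rest))
termination_by k.toNat
decreasing_by omega


-- ===== PRECONDITION & SPEC =====
-- Pre_ excludes only k < 1, where Python A raises AssertionError.
def Pre_strksplit (string : String) (k : Int) (_i : Int) : Prop := 1 ≤ k
instance (string : String) (k : Int) (_i : Int) : Decidable (Pre_strksplit string k _i) := by unfold Pre_strksplit; infer_instance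
def pvWitness_strksplit : String × Int × Int := ("abc", 2, 1)

def Spec_strksplit (string : String) (k : Int) (_i : Int) (out : List (List String)) : Prop := out = strksplit_alt string k _i
instance (string : String) (k : Int) (_i : Int) (out : List (List String)) : Decidable (Spec_strksplit string k _i out) := by unfold Spec_strksplit; infer_instance

-- ===== CLAIM (what is proved, stated in full; the proofs are below) =====
def Claim_equal_strksplit : Prop := ∀ (string : String) (k : Int) (_i : Int), Dom_strksplit string k _i → Pre_strksplit string k _i → Spec_strksplit string k _i (strksplit string k _i)

-- ===== LEMMAS AND PROOFS =====

theorem foldl_append_cons {α : Type} (x : α) (l : List (List α)) (acc : List (List α)) :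
    l.foldl (fun acc split => acc ++ [x :: split]) acc = acc ++ l.map (fun s => x :: s) := by
  induction l generalizing acc with
  | nil => simp
  | cons h t ih => simp [List.foldl, ih]

theorem strksplit_eq_alt (string : String) (k : Int) (_i : Int) :
    1 ≤ k → strksplit string k _i = strksplit_alt string k _i := by
  fun_induction strksplit string k _i with
  | case1 string k _i h => intro hk; omega
  | case2 string _i h =>
      intro _
      rw [strksplit_alt.eq_def]
      norm_num
  | case3 string k _i h1 h2 h3 =>
      intro _
      rw [strksplit_alt.eq_def]
      simp only [if_neg h1, if_neg h2]
      have : PySem.List.pyRange _i (PySem.Str.len string) 1 = [] := by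
        rw [PySem.List.pyRange_one]
        simp only [PySem.Str.len_eq, String.length_toList] at h3 ⊢
        have h0 : ((string.length : Int) - _i).toNat = 0 := by omega
        simp [h0]
      rw [this, List.flatMap_nil]
  | case4 string k _i h1 h2 h3 ih1 ih2 =>
      intro hk
      rw [ih1 (by omega), ih2 hk]
      rw [foldl_append_cons, List.nil_append]
      conv_rhs => rw [strksplit_alt.eq_def]
      simp only [if_neg h1, if_neg h2]
      rw [PySem.List.pyRange_one_cons (by omega), List.flatMap_cons]
      congr 1
      conv_lhs => rw [strksplit_alt.eq_def]
      simp only [if_neg h1, if_neg h2]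

-- ===== VERDICT (by name: the statement is the Claim_ definition above) =====
theorem strksplit_spec : Claim_equal_strksplit := by
  intro string k _i _ hpre
  unfold Spec_strksplit
  exact strksplit_eq_alt string k _i hpre
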